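-- pv_equiv track=rewrite | github.com/literism/tree | hierarchical_classifier/prepare_dataset.py | parse_paths_to_classifications
-- ===== SOURCE A (Python) =====
-- from typing import Dict, List, Set, Tuple, Optional
-- from collections import defaultdict
--
-- def parse_paths_to_classifications(paths: List[str]) -> List[Tuple[str, List[str]]]:
--     """
--     将路径列表解析为分类步骤列表
--
--     Args:
--         paths: 路径列表，如 ["T - A - a1", "T - A - a2", "T - B - b1"]
--
--     Returns:
--         分类步骤列表 [(current_path, output_titles), ...]
--         例如: [("T", ["A", "B"]), ("T - A", ["a1", "a2"]), ("T - B", ["b1"])]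
--     """
--     classifications = defaultdict(set)
--
--     for path in paths:
--         parts = [p.strip() for p in path.split(' - ')]
--
--         # 对每一层都记录分类
--         for i in range(1, len(parts)):
--             # 当前路径
--             current_path = ' - '.join(parts[:i])
--             # 输出标题
--             output_title = parts[i]
--             classifications[current_path].add(output_title)
--
--     # 转换为列表
--     result = [(path, sorted(list(titles))) for path, titles in classifications.items()]
--     # 按照路径深度排序
--     result.sort(key=lambda x: x[0].count(' - '))
--
--     return result
-- ===== SOURCE B (Python) =====
-- def parse_paths_to_classifications(paths):
--     # Depth-staged emission: split every path once, then walk depth levels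
--     # 1..max-1, grouping that level's prefixes into a dict of sets and
--     # emitting the finished level immediately -- no global dict, no final sort.
--     split = [[p.strip() for p in path.split(' - ')] for path in paths]
--     max_len = max((len(parts) for parts in split), default=0)
--     result = []
--     for d in range(1, max_len):
--         level = {}
--         for parts in split:
--             if len(parts) > d:
--                 level.setdefault(' - '.join(parts[:d]), set()).add(parts[d])
--         for prefix, titles in level.items():
--             result.append((prefix, sorted(titles)))
--     return result
-- ===== Notes on version B (the rewrite author's own statement) =====
-- stated objective: alternative
-- what changed: B splits all paths once, then emits the result depth level by depth level (outer loop over depths, inner scan of the split paths building one per-level dict of sets), so the single global grouping dict and the final stable sort by ' - '-count disappear entirely.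
import Mathlib
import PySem

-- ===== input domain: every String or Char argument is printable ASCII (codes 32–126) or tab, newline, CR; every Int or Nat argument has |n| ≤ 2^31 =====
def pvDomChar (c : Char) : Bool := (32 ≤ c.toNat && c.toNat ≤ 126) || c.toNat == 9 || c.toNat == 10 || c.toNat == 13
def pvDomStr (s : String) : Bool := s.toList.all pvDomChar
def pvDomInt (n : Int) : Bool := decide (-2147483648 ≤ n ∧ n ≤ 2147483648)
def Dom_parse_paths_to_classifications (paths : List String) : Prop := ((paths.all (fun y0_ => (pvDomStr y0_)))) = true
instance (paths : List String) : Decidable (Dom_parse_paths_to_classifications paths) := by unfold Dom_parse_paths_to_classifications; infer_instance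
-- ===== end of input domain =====

-- B replaces A's grouping dict + final stable sort by depth-staged passes: one dict per depth level,
-- emitted in order, so no sort is needed (return-value equivalence; neither mutates its input).

-- ===== PORT A =====
def parse_paths_to_classifications (paths : List String) : List (String × List String) :=
  let classifications : PySem.Dict String (PySem.Set String) :=
    paths.foldl (fun d path =>
      let parts := ((PySem.Str.split? path " - ").getD []).map PySem.Str.strip
      (PySem.List.pyRange 1 (parts.length : Int)).foldl (fun d i =>
        let current_path := PySem.Str.join " - " (PySem.List.slice parts none (some i))
        let output_title := PySem.List.pyGetD parts i ""
        d.modify current_path PySem.Set.empty (fun s => PySem.Set.add s output_title)) d)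
      PySem.Dict.empty
  let result := classifications.items.map (fun pt => (pt.1, PySem.List.sorted pt.2 (fun x => x)))
  PySem.List.sorted result (fun x => (PySem.Str.count x.1 " - " : Int))

-- ===== PORT B =====
def parse_paths_to_classifications_alt (paths : List String) : List (String × List String) :=
  let split := paths.map (fun path => ((PySem.Str.split? path " - ").getD []).map PySem.Str.strip)
  let max_len : Int := (PySem.List.max? (split.map (fun parts => (parts.length : Int))) (fun x => x)).getD 0
  (PySem.List.pyRange 1 max_len).foldl (fun result d =>
    let level : PySem.Dict String (PySem.Set String) :=
      split.foldl (fun level parts =>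
        if (parts.length : Int) > d then
          level.modify (PySem.Str.join " - " (PySem.List.slice parts none (some d)))
            PySem.Set.empty (fun s => PySem.Set.add s (PySem.List.pyGetD parts d ""))
        else level) PySem.Dict.empty
    result ++ level.items.map (fun pt => (pt.1, PySem.List.sorted pt.2 (fun x => x)))) []

-- ===== PRECONDITION & SPEC =====
-- pvCleanChars scans a string for the pattern space, dash, non-space whitespace (' -' + tab/NL/CR).
def pvCleanAux : Char → Char → List Char → Bool
  | _, _, [] => true
  | a, b, c :: rest =>
      (!(a == ' ' && b == '-' && (PySem.Chars.isspace c && !(c == ' ')))) && pvCleanAux b c rest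

def pvCleanChars : List Char → Bool
  | a :: b :: rest => pvCleanAux a b rest
  | _ => true

-- Pre_ excludes paths containing ' -' immediately followed by a non-space whitespace character
-- (tab/newline/CR): a stripped segment can then end in ' -', the textual ' - ' count of a joined
-- prefix deviates from its structural depth, and A's count-keyed ordering of such prefixes is an
-- accident of the representation (B orders them by depth, which is equally defensible).
def Pre_parse_paths_to_classifications (paths : List String) : Prop :=
  paths.all (fun p => pvCleanChars p.toList) = true
instance (paths : List String) : Decidable (Pre_parse_paths_to_classifications paths) := by
  unfold Pre_parse_paths_to_classifications; infer_instance

def pvWitness_parse_paths_to_classifications : List String :=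
  ["T - A - a1", "T - A - a2", "T - B - b1"]

def Spec_parse_paths_to_classifications (paths : List String) (out : List (String × List String)) : Prop := out = parse_paths_to_classifications_alt paths
instance (paths : List String) (out : List (String × List String)) : Decidable (Spec_parse_paths_to_classifications paths out) := by unfold Spec_parse_paths_to_classifications; infer_instance

-- ===== CLAIM (what is proved, stated in full; the proofs are below) =====
def Claim_equal_parse_paths_to_classifications : Prop := ∀ (paths : List String), Dom_parse_paths_to_classifications paths → Pre_parse_paths_to_classifications paths → Spec_parse_paths_to_classifications paths (parse_paths_to_classifications paths)

-- ===== LEMMAS AND PROOFS =====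

def pvSep : List Char := [' ', '-', ' ']

def pvSplitRef : List Char → List (List Char)
  | [] => [[]]
  | c :: rest =>
    if pvSep.isPrefixOf (c :: rest) then [] :: pvSplitRef (List.drop 2 rest)
    else (pvSplitRef rest).modifyHead (c :: ·)
  termination_by l => l.length
  decreasing_by all_goals simp

theorem pvSplitRef_ne_nil : ∀ (l : List Char), pvSplitRef l ≠ [] := by
  intro l
  induction l using pvSplitRef.induct with
  | case1 => simp [pvSplitRef]
  | case2 c rest hp ih =>
    rw [pvSplitRef, if_pos hp]; simp
  | case3 c rest hp ih =>
    rw [pvSplitRef, if_neg hp]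
    cases h : pvSplitRef rest with
    | nil => exact absurd h ih
    | cons a b => simp [h, List.modifyHead]

theorem pvSplitRef_exists_cons (l : List Char) : ∃ p tl, pvSplitRef l = p :: tl := by
  cases h : pvSplitRef l with
  | nil => exact absurd h (pvSplitRef_ne_nil l)
  | cons a b => exact ⟨a, b, rfl⟩

theorem pvSplitOn_go_eq (fuel : Nat) : ∀ (l cur : List Char) (acc : List (List Char)),
    l.length ≤ fuel →
    PySem.Chars.splitOn.go pvSep fuel l cur acc
      = acc.reverse ++ (pvSplitRef l).modifyHead (cur.reverse ++ ·) := by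
  induction fuel with
  | zero =>
    intro l cur acc h
    have : l = [] := by cases l <;> simp_all
    subst this
    rw [PySem.Chars.splitOn.go]
    simp [pvSplitRef]
  | succ n ih =>
    intro l cur acc h
    match l with
    | [] =>
      rw [PySem.Chars.splitOn.go]
      · simp [pvSplitRef]
      · simp
    | c :: rest =>
      rw [PySem.Chars.splitOn.go]
      by_cases hp : pvSep.isPrefixOf (c :: rest)
      · rw [if_pos hp]
        have hlen : (List.drop pvSep.length (c :: rest)).length ≤ n := by
          simp [pvSep] at h ⊢; omega
        rw [ih _ _ _ hlen]
        rw [pvSplitRef, if_pos hp]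
        obtain ⟨p, tl, hps⟩ := pvSplitRef_exists_cons (List.drop 2 rest)
        simp [pvSep, hps, List.modifyHead]
      · rw [if_neg hp]
        have hlen : rest.length ≤ n := by simp at h; omega
        rw [ih _ _ _ hlen]
        rw [pvSplitRef, if_neg hp]
        obtain ⟨p, tl, hps⟩ := pvSplitRef_exists_cons rest
        simp [hps, List.modifyHead]

theorem pvSplitOn_eq (l : List Char) :
    PySem.Chars.splitOn l pvSep = pvSplitRef l := by
  rw [PySem.Chars.splitOn, pvSplitOn_go_eq (l.length + 1) l [] [] (by omega)]
  obtain ⟨p, tl, hps⟩ := pvSplitRef_exists_cons l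
  simp [hps, List.modifyHead]

def pvCountRef : List Char → Nat
  | [] => 0
  | c :: rest =>
    if pvSep.isPrefixOf (c :: rest) then pvCountRef (List.drop 2 rest) + 1
    else pvCountRef rest
  termination_by l => l.length
  decreasing_by all_goals simp

theorem pvCount_go_eq (fuel : Nat) : ∀ (l : List Char) (acc : Nat),
    l.length ≤ fuel →
    PySem.Chars.count.go pvSep fuel l acc = acc + pvCountRef l := by
  induction fuel with
  | zero =>
    intro l acc h
    have : l = [] := by cases l <;> simp_all
    subst this
    rw [PySem.Chars.count.go]; simp [pvCountRef]
  | succ n ih =>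
    intro l acc h
    match l with
    | [] =>
      rw [PySem.Chars.count.go]
      · simp [pvCountRef]
      · simp
    | c :: rest =>
      rw [PySem.Chars.count.go]
      by_cases hp : pvSep.isPrefixOf (c :: rest)
      · rw [if_pos hp]
        have hlen : (List.drop pvSep.length (c :: rest)).length ≤ n := by
          simp [pvSep] at h ⊢; omega
        rw [ih _ _ hlen]
        rw [pvCountRef, if_pos hp]
        simp [pvSep]; omega
      · rw [if_neg hp]
        have hlen : rest.length ≤ n := by simp at h; omega
        rw [ih _ _ hlen, pvCountRef, if_neg hp]

theorem pvCount_eq (l : List Char) : PySem.Chars.count l pvSep = pvCountRef l := by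
  rw [PySem.Chars.count]
  rw [if_neg (by simp [pvSep])]
  rw [pvCount_go_eq l.length l 0 (le_refl _)]
  simp

def pvPiecesOK : List (List Char) → Prop
  | [] => True
  | [p] => ¬ pvSep <:+: p
  | p :: q :: tl => (¬ pvSep <:+: p) ∧ (¬ [' ', '-'] <:+ p) ∧ pvPiecesOK (q :: tl)

theorem pvSplit_spec : ∀ (l : List Char),
    PySem.Chars.join pvSep (pvSplitRef l) = l ∧ pvPiecesOK (pvSplitRef l) := by
  intro l
  induction l using pvSplitRef.induct with
  | case1 =>
    refine ⟨?_, ?_⟩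
    · simp [pvSplitRef, PySem.Chars.join, List.intercalate]
    · simp only [pvSplitRef, pvPiecesOK]
      intro h
      have := h.length_le
      simp [pvSep] at this
  | case2 c rest hp ih =>
    rw [pvSplitRef, if_pos hp]
    obtain ⟨p, tl, hps⟩ := pvSplitRef_exists_cons (List.drop 2 rest)
    obtain ⟨hj, hok⟩ := ih
    constructor
    · rw [hps] at hj ⊢
      rw [PySem.Chars.join_cons_cons, hj]
      obtain ⟨t, ht⟩ := List.isPrefixOf_iff_prefix.mp hp
      have hdrop : List.drop 2 rest = t := by
        have := congrArg (List.drop 3) ht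
        simpa [pvSep] using this.symm
      rw [hdrop, ← ht]
      simp
    · rw [hps] at hok ⊢
      exact ⟨by simp [pvSep], by simp, hok⟩
  | case3 c rest hp ih =>
    rw [pvSplitRef, if_neg hp]
    obtain ⟨p, tl, hps⟩ := pvSplitRef_exists_cons rest
    obtain ⟨hj, hok⟩ := ih
    rw [hps] at hj hok
    rw [hps, List.modifyHead]
    have hpre : ¬ pvSep <+: (c :: rest) := by
      intro hcontra
      exact absurd (List.isPrefixOf_iff_prefix.mpr hcontra) (by simpa using hp)
    have hjoin : PySem.Chars.join pvSep ((c :: p) :: tl) = c :: rest := by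
      cases tl with
      | nil =>
        simp only [PySem.Chars.join, List.intercalate] at hj ⊢
        simp at hj ⊢
        exact hj
      | cons q tl' =>
        rw [PySem.Chars.join_cons_cons] at hj ⊢
        rw [List.cons_append, List.cons_append, hj]
    have hcp_prefix : (c :: p) <+: (c :: rest) := by
      cases tl with
      | nil =>
        simp only [PySem.Chars.join, List.intercalate] at hj
        simp at hj
        simp [hj]
      | cons q tl' =>
        rw [PySem.Chars.join_cons_cons] at hj
        refine ⟨pvSep ++ PySem.Chars.join pvSep (q :: tl'), ?_⟩
        rw [← hj]; simp
    refine ⟨hjoin, ?_⟩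
    cases tl with
    | nil =>
      simp only [pvPiecesOK] at hok ⊢
      intro hinf
      rcases List.infix_cons_iff.mp hinf with hpre' | hinf'
      · exact hpre (hpre'.trans hcp_prefix)
      · exact hok hinf'
    | cons q tl' =>
      simp only [pvPiecesOK] at hok ⊢
      refine ⟨?_, ?_, hok.2.2⟩
      · intro hinf
        rcases List.infix_cons_iff.mp hinf with hpre' | hinf'
        · exact hpre (hpre'.trans hcp_prefix)
        · exact hok.1 hinf'
      · intro hsuf
        rcases List.suffix_cons_iff.mp hsuf with heq | hsuf'
        · have hc : c = ' ' := by injection heq with h1 _; exact h1.symm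
          have hp2 : p = ['-'] := by injection heq with _ h2; exact h2.symm
          rw [PySem.Chars.join_cons_cons] at hj
          apply hpre
          rw [← hj, hp2, hc]
          exact ⟨'-' :: ' ' :: PySem.Chars.join pvSep (q :: tl'), by simp [pvSep]⟩
        · exact hok.2.1 hsuf'

-- strip p is an infix of p
theorem pvStrip_infix (p : List Char) : PySem.Chars.strip p <:+: p := by
  rw [PySem.Chars.strip]
  have h1 : PySem.Chars.lstrip p <:+ p := by
    rw [PySem.Chars.lstrip]; exact List.dropWhile_suffix _
  have h2 : PySem.Chars.rstrip (PySem.Chars.lstrip p) <+: PySem.Chars.lstrip p := by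
    rw [PySem.Chars.rstrip]
    have := List.dropWhile_suffix (l := (PySem.Chars.lstrip p).reverse) (p := PySem.Chars.isspace)
    rw [← List.reverse_prefix] at this
    simpa using this
  exact h2.isInfix.trans h1.isInfix

-- lstrip p = strip p ++ (all-whitespace tail)
theorem pvStrip_decomp (p : List Char) :
    ∃ b, PySem.Chars.lstrip p = PySem.Chars.strip p ++ b ∧ ∀ w ∈ b, PySem.Chars.isspace w = true := by
  rw [PySem.Chars.strip, PySem.Chars.rstrip]
  refine ⟨(List.takeWhile PySem.Chars.isspace (PySem.Chars.lstrip p).reverse).reverse, ?_, ?_⟩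
  · rw [← List.reverse_append, List.takeWhile_append_dropWhile, List.reverse_reverse]
  · intro w hw
    rw [List.mem_reverse] at hw
    exact List.mem_takeWhile_imp hw

theorem pvCleanAux_no_bad : ∀ (rest : List Char) (a b : Char), pvCleanAux a b rest = true →
    ∀ (u : List Char) (w : Char) (v : List Char), a :: b :: rest = u ++ ' ' :: '-' :: w :: v →
    PySem.Chars.isspace w = true → w = ' ' := by
  intro rest
  induction rest with
  | nil =>
    intro a b _ u w v heq _
    exfalso
    have := congrArg List.length heq
    simp at this
    omega
  | cons c rest' ih =>
    intro a b hcl u w v heq hsp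
    rw [pvCleanAux] at hcl
    simp only [Bool.and_eq_true, Bool.not_eq_true'] at hcl
    cases u with
    | nil =>
      simp only [List.nil_append] at heq
      injection heq with ha heq2
      injection heq2 with hb heq3
      injection heq3 with hc _
      subst ha; subst hb; subst hc
      by_contra hne
      have := hcl.1
      simp [hsp, hne] at this
    | cons u0 u' =>
      have htail : b :: c :: rest' = u' ++ ' ' :: '-' :: w :: v := by
        simpa using congrArg List.tail heq
      exact ih b c hcl.2 u' w v htail hsp

theorem pvClean_no_bad : ∀ (l : List Char), pvCleanChars l = true →
    ∀ (u : List Char) (w : Char) (v : List Char), l = u ++ ' ' :: '-' :: w :: v →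
    PySem.Chars.isspace w = true → w = ' ' := by
  intro l hcl u w v heq hsp
  match l, heq with
  | [], heq =>
    exfalso
    have := congrArg List.length heq
    simp at this
  | [a], heq =>
    exfalso
    have := congrArg List.length heq
    simp at this
    omega
  | a :: b :: rest, heq =>
    exact pvCleanAux_no_bad rest a b (by simpa [pvCleanChars] using hcl) u w v heq hsp

def pvGoodMid (p : List Char) : Prop := (¬ pvSep <:+: p) ∧ ¬ [' ', '-'] <:+ p

def pvPartsOK : List (List Char) → Prop
  | [] => True
  | [p] => ¬ pvSep <:+: p
  | p :: q :: tl => pvGoodMid p ∧ pvPartsOK (q :: tl)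

theorem pvMem_join_infix (sep : List Char) : ∀ (ps : List (List Char)) (p : List Char),
    p ∈ ps → p <:+: PySem.Chars.join sep ps := by
  intro ps
  induction ps with
  | nil => simp
  | cons q tl ih =>
    intro p hp
    cases tl with
    | nil =>
      simp at hp
      subst hp
      simp [PySem.Chars.join, List.intercalate]
    | cons r tl' =>
      rw [PySem.Chars.join_cons_cons]
      rcases List.mem_cons.mp hp with heq | hmem
      · subst heq
        exact ((p.prefix_append (sep ++ PySem.Chars.join sep (r :: tl'))).trans
          (by rw [List.append_assoc])).isInfix
      · exact (ih p hmem).trans (List.suffix_append _ _).isInfix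

theorem pvStrip_goodmid (p L : List Char) (h1 : ¬ pvSep <:+: p) (h2 : ¬ [' ', '-'] <:+ p)
    (hL : p <:+: L) (hcl : pvCleanChars L = true) : pvGoodMid (PySem.Chars.strip p) := by
  constructor
  · intro hinf
    exact h1 (hinf.trans (pvStrip_infix p))
  · intro hsuf
    obtain ⟨u, hu⟩ := hsuf
    obtain ⟨b, hb, hbsp⟩ := pvStrip_decomp p
    have hlsuf : PySem.Chars.lstrip p <:+ p := by
      rw [PySem.Chars.lstrip]; exact List.dropWhile_suffix _
    cases b with
    | nil =>
      apply h2
      rw [List.append_nil] at hb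
      exact (hu ▸ (List.suffix_append u [' ', '-'])).trans (hb ▸ hlsuf)
    | cons w b' =>
      have hwsp : PySem.Chars.isspace w = true := hbsp w (by simp)
      -- lstrip p = u ++ ' ' :: '-' :: w :: b'
      have hshape : PySem.Chars.lstrip p = u ++ ' ' :: '-' :: w :: b' := by
        rw [hb, ← hu]; simp
      have hinfL : PySem.Chars.lstrip p <:+: L := hlsuf.isInfix.trans hL
      obtain ⟨x, y, hxy⟩ := hinfL
      have hLe : L = (x ++ u) ++ ' ' :: '-' :: w :: (b' ++ y) := by
        rw [← hxy, hshape]; simp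
      have hw : w = ' ' := pvClean_no_bad L hcl (x ++ u) w (b' ++ y) hLe hwsp
      apply h1
      have : pvSep <:+: PySem.Chars.lstrip p := by
        rw [hshape, hw]
        exact ⟨u, b', by simp [pvSep]⟩
      exact this.trans hlsuf.isInfix
  
theorem pvParts_ok : ∀ (ps : List (List Char)) (L : List Char), pvPiecesOK ps →
    (∀ p ∈ ps, p <:+: L) → pvCleanChars L = true →
    pvPartsOK (ps.map PySem.Chars.strip) := by
  intro ps
  induction ps with
  | nil => intro L _ _ _; simp [pvPartsOK]
  | cons p tl ih =>
    intro L hok hmem hcl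
    cases tl with
    | nil =>
      simp only [List.map, pvPartsOK] at *
      intro hinf
      exact hok (hinf.trans (pvStrip_infix p))
    | cons q tl' =>
      simp only [pvPiecesOK] at hok
      have hrest := ih L hok.2.2 (fun r hr => hmem r (List.mem_cons_of_mem _ hr)) hcl
      simp only [List.map_cons] at hrest ⊢
      exact ⟨pvStrip_goodmid p L hok.1 hok.2.1 (hmem p (by simp)) hcl, hrest⟩

theorem pvCount_zero : ∀ (p : List Char), ¬ pvSep <:+: p → pvCountRef p = 0 := by
  intro p
  induction p using pvCountRef.induct with
  | case1 => intro _; simp [pvCountRef]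
  | case2 c rest hp ih =>
    intro h
    exact absurd (List.isPrefixOf_iff_prefix.mp hp).isInfix h
  | case3 c rest hp ih =>
    intro h
    rw [pvCountRef, if_neg hp]
    exact ih (fun hinf => h (hinf.trans (List.suffix_cons c rest).isInfix))

theorem pvCount_cross : ∀ (p : List Char), ¬ pvSep <:+: p → ¬ [' ', '-'] <:+ p →
    ∀ (t : List Char), pvCountRef (p ++ pvSep ++ t) = pvCountRef t + 1 := by
  intro p
  induction p with
  | nil =>
    intro _ _ t
    show pvCountRef (' ' :: ('-' :: ' ' :: t)) = _
    rw [pvCountRef, if_pos (by simp [pvSep])]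
    simp
  | cons c p' ih =>
    intro h1 h2 t
    have hnp : ¬ pvSep.isPrefixOf ((c :: p') ++ pvSep ++ t) := by
      intro hpf
      have hpf' := List.isPrefixOf_iff_prefix.mp hpf
      match p', hpf' with
      | [], hpf' =>
        -- c :: ' ' :: '-' :: ' ' :: t ; sep = ' ' '-' ' ' mismatch at 2nd char
        obtain ⟨r, hr⟩ := hpf'
        simp [pvSep] at hr
      | [d], hpf' =>
        obtain ⟨r, hr⟩ := hpf'
        simp [pvSep] at hr
        obtain ⟨hc, hd, -⟩ := hr
        exact h2 ⟨[], by simp [← hc, ← hd]⟩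
      | d :: e :: p'', hpf' =>
        apply h1
        have : pvSep <+: (c :: d :: e :: p'') := by
          obtain ⟨r, hr⟩ := hpf'
          simp [pvSep] at hr ⊢
          obtain ⟨h1', h2', h3', -⟩ := hr
          exact ⟨h1', h2', h3'⟩
        exact this.isInfix
    show pvCountRef (c :: (p' ++ pvSep ++ t)) = _
    rw [pvCountRef, if_neg (by simpa using hnp)]
    apply ih
    · intro hinf
      exact h1 (hinf.trans (List.suffix_cons c p').isInfix)
    · intro hsuf
      exact h2 (hsuf.trans (List.suffix_cons c p'))

theorem pvCount_join : ∀ (qs : List (List Char)) (last : List Char),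
    (∀ q ∈ qs, pvGoodMid q) → ¬ pvSep <:+: last →
    pvCountRef (PySem.Chars.join pvSep (qs ++ [last])) = qs.length := by
  intro qs
  induction qs with
  | nil =>
    intro last _ hl
    simp only [List.nil_append]
    have : PySem.Chars.join pvSep [last] = last := by
      simp [PySem.Chars.join, List.intercalate]
    rw [this]
    exact pvCount_zero last hl
  | cons q qs' ih =>
    intro last hmid hl
    have hg := hmid q (by simp)
    have hsplit : PySem.Chars.join pvSep (q :: qs' ++ [last])
        = q ++ pvSep ++ PySem.Chars.join pvSep (qs' ++ [last]) := by
      cases qs' with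
      | nil => simpa using PySem.Chars.join_cons_cons pvSep q last []
      | cons r qs'' => simpa using PySem.Chars.join_cons_cons pvSep q r (qs'' ++ [last])
    rw [hsplit, pvCount_cross q hg.1 hg.2]
    rw [ih last (fun r hr => hmid r (by simp [hr])) hl]
    simp

theorem pvPartsOK_split : ∀ (qs : List (List Char)) (r : List Char) (rest : List (List Char)),
    pvPartsOK (qs ++ r :: rest) → (∀ q ∈ qs, pvGoodMid q) ∧ ¬ pvSep <:+: r := by
  intro qs
  induction qs with
  | nil =>
    intro r rest h
    cases rest with
    | nil => exact ⟨by simp, by simpa [pvPartsOK] using h⟩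
    | cons m tl => exact ⟨by simp, (by simpa [pvPartsOK] using h : pvGoodMid r ∧ _).1.1⟩
  | cons q qs' ih =>
    intro r rest h
    obtain ⟨m, tl, hshape⟩ : ∃ m tl, qs' ++ r :: rest = m :: tl := by
      cases qs' <;> simp
    rw [List.cons_append, hshape] at h
    have h' : pvGoodMid q ∧ pvPartsOK (m :: tl) := by simpa [pvPartsOK] using h
    rw [← hshape] at h'
    obtain ⟨hmem, hr⟩ := ih r rest h'.2
    refine ⟨?_, hr⟩
    intro x hx
    rcases List.mem_cons.mp hx with heq | hmem'
    · exact heq ▸ h'.1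
    · exact hmem x hmem'

theorem pvPartsL (path : String) :
    (((PySem.Str.split? path " - ").getD []).map PySem.Str.strip).map String.toList
      = (pvSplitRef path.toList).map PySem.Chars.strip := by
  have hsep : (" - " : String).toList = pvSep := by decide
  have h := PySem.Str.split?_map path " - "
  rw [hsep, PySem.Chars.split?] at h
  rw [if_neg (by simp [pvSep])] at h
  cases hs : PySem.Str.split? path " - " with
  | none => rw [hs] at h; simp at h
  | some l =>
    rw [hs] at h
    simp only [Option.map_some, Option.some.injEq] at h
    simp only [hs, Option.getD_some]
    rw [List.map_map]
    have hc : String.toList ∘ PySem.Str.strip = PySem.Chars.strip ∘ String.toList := by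
      funext s; simp [PySem.Str.toList_strip]
    rw [hc, ← List.map_map, h, pvSplitOn_eq]

theorem pvKeyCountL : ∀ (psm : List (List Char)), pvPartsOK psm → ∀ (d : Nat), 1 ≤ d →
    d < psm.length → pvCountRef (PySem.Chars.join pvSep (List.take d psm)) = d - 1 := by
  intro psm hok d h1 hd
  have hdd : d - 1 < psm.length := by omega
  have hr : psm[d-1]? = some psm[d-1] := List.getElem?_eq_getElem hdd
  have htake : List.take d psm = List.take (d-1) psm ++ [psm[d-1]] := by
    conv_lhs => rw [show d = d-1+1 by omega]
    rw [List.take_succ, hr]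
    simp
  have hdecomp : psm = List.take (d-1) psm ++ psm[d-1] :: List.drop d psm := by
    conv_lhs => rw [← List.take_append_drop (d-1) psm]
    congr 1
    rw [List.drop_eq_getElem_cons hdd, show d-1+1 = d by omega]
  obtain ⟨hmid, hlast⟩ := pvPartsOK_split (List.take (d-1) psm) _ _ (hdecomp ▸ hok)
  rw [htake, pvCount_join _ _ hmid hlast]
  simp
  omega

theorem pvPartsOK_of_clean (path : String) (hcl : pvCleanChars path.toList = true) :
    pvPartsOK ((pvSplitRef path.toList).map PySem.Chars.strip) := by
  have hspec := pvSplit_spec path.toList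
  apply pvParts_ok _ _ hspec.2 _ hcl
  intro p hp
  conv_rhs => rw [← hspec.1]
  exact pvMem_join_infix pvSep _ p hp

theorem pvKeyCount (path : String) (hcl : pvCleanChars path.toList = true) (d : Nat)
    (h1 : 1 ≤ d)
    (hd : d < (((PySem.Str.split? path " - ").getD []).map PySem.Str.strip).length) :
    PySem.Str.count
      (PySem.Str.join " - " (List.take d (((PySem.Str.split? path " - ").getD []).map PySem.Str.strip)))
      " - " = d - 1 := by
  have hsep : (" - " : String).toList = pvSep := by decide
  rw [PySem.Str.count_eq, hsep, PySem.Str.toList_join, hsep]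
  have hmap : (List.take d (((PySem.Str.split? path " - ").getD []).map PySem.Str.strip)).map String.toList
      = List.take d ((pvSplitRef path.toList).map PySem.Chars.strip) := by
    rw [List.map_take, pvPartsL]
  rw [hmap, pvCount_eq]
  apply pvKeyCountL _ (pvPartsOK_of_clean path hcl) d h1
  have := congrArg List.length (pvPartsL path)
  simp only [List.length_map] at this ⊢
  rw [← this]
  simpa using hd

def pvStep (d : PySem.Dict String (PySem.Set String)) (e : String × String) :
    PySem.Dict String (PySem.Set String) :=
  d.modify e.1 PySem.Set.empty (fun s => PySem.Set.add s e.2)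

theorem pvFind_filter {α : Type} (P : String → Bool) (l : List (String × α)) (k : String)
    (hP : P k = true) :
    (l.filter (fun kv => P kv.1)).find? (fun p => p.1 == k) = l.find? (fun p => p.1 == k) := by
  induction l with
  | nil => simp
  | cons kv t ih =>
    by_cases hkv : P kv.1 = true
    · rw [List.filter_cons_of_pos (by simpa using hkv)]
      by_cases hk : (kv.1 == k) = true
      · rw [List.find?_cons_of_pos (by simpa using hk), List.find?_cons_of_pos (by simpa using hk)]
      · rw [List.find?_cons_of_neg (by simpa using hk), List.find?_cons_of_neg (by simpa using hk), ih]
    · rw [List.filter_cons_of_neg (by simpa using hkv)]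
      have hk : (kv.1 == k) = false := by
        by_contra hc
        simp at hc
        rw [hc] at hkv
        exact hkv hP
      rw [List.find?_cons_of_neg (by simp [hk]), ih]

theorem pvGet?_filter {α : Type} (P : String → Bool) (D D' : PySem.Dict String α) (k : String)
    (hP : P k = true) (h : D'.items = D.items.filter (fun kv => P kv.1)) :
    D'.get? k = D.get? k := by
  rw [PySem.Dict.get?, PySem.Dict.get?, h, pvFind_filter P _ _ hP]

theorem pvContains_filter {α : Type} (P : String → Bool) (D D' : PySem.Dict String α) (k : String)
    (hP : P k = true) (h : D'.items = D.items.filter (fun kv => P kv.1)) :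
    D'.contains k = D.contains k := by
  rw [PySem.Dict.contains_eq_isSome_get?, PySem.Dict.contains_eq_isSome_get?,
    pvGet?_filter P D D' k hP h]

theorem pvFilterKeyMap {α : Type} (P : String → Bool) (k : String) (v : α)
    (l : List (String × α)) :
    (l.map (fun p => if p.1 == k then (k, v) else p)).filter (fun kv => P kv.1)
      = (l.filter (fun kv => P kv.1)).map (fun p => if p.1 == k then (k, v) else p) := by
  rw [List.filter_map]
  congr 1
  apply List.filter_congr
  intro p _
  by_cases hk : (p.1 == k) = true
  · have : p.1 = k := by simpa using hk
    simp [Function.comp, hk, this]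
  · simp [Function.comp, hk]

theorem pvStep_items_filter (P : String → Bool) (D D' : PySem.Dict String (PySem.Set String))
    (e : String × String)
    (h : D'.items = D.items.filter (fun kv => P kv.1)) :
    (if P e.1 = true then (pvStep D' e).items else D'.items)
      = (pvStep D e).items.filter (fun kv => P kv.1) := by
  have hmod : ∀ (X : PySem.Dict String (PySem.Set String)),
      pvStep X e = X.insert e.1 (PySem.Set.add (X.getD e.1 PySem.Set.empty) e.2) := fun _ => rfl
  by_cases hP : P e.1 = true
  · rw [if_pos hP, hmod, hmod]
    have hget : D'.getD e.1 PySem.Set.empty = D.getD e.1 PySem.Set.empty := by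
      rw [PySem.Dict.getD_eq_get?_getD, PySem.Dict.getD_eq_get?_getD,
        pvGet?_filter P D D' e.1 hP h]
    rw [hget]
    by_cases hc : D.contains e.1 = true
    · rw [PySem.Dict.items_insert_of_contains _ _ hc,
        PySem.Dict.items_insert_of_contains _ _ ((pvContains_filter P D D' e.1 hP h).trans hc),
        pvFilterKeyMap, h]
    · have hc' : D.contains e.1 = false := by simpa using hc
      rw [PySem.Dict.items_insert_of_not_contains _ _ hc',
        PySem.Dict.items_insert_of_not_contains _ _
          (by rw [pvContains_filter P D D' e.1 hP h]; exact hc'),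
        List.filter_append, h]
      simp [hP]
  · rw [if_neg hP]
    have hP' : P e.1 = false := by simpa using hP
    rw [hmod]
    by_cases hc : D.contains e.1 = true
    · rw [PySem.Dict.items_insert_of_contains _ _ hc, pvFilterKeyMap, h]
      refine ((List.map_congr_left ?_).trans (List.map_id _)).symm
      intro p hp
      have hpP : P p.1 = true := by
        have := (List.mem_filter.mp hp).2
        simpa using this
      have : (p.1 == e.1) = false := by
        by_contra hb
        simp at hb
        rw [hb, hP'] at hpP
        exact Bool.false_ne_true hpP
      simp [this]
    · have hc' : D.contains e.1 = false := by simpa using hc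
      rw [PySem.Dict.items_insert_of_not_contains _ _ hc', List.filter_append, h]
      simp [hP']

theorem pvFoldFilter (P : String → Bool) :
    ∀ (E : List (String × String)) (D D' : PySem.Dict String (PySem.Set String)),
    D'.items = D.items.filter (fun kv => P kv.1) →
    ((E.foldl pvStep D).items.filter (fun kv => P kv.1))
      = ((E.filter (fun e => P e.1)).foldl pvStep D').items := by
  intro E
  induction E with
  | nil => intro D D' h; simpa using h.symm
  | cons e E' ih =>
    intro D D' h
    rw [List.foldl_cons]
    by_cases hP : P e.1 = true
    · have hfc : List.filter (fun x => P x.1) (e :: E') = e :: List.filter (fun x => P x.1) E' := by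
        simp [List.filter_cons, hP]
      rw [hfc, List.foldl_cons]
      apply ih
      have := pvStep_items_filter P D D' e h
      rwa [if_pos hP] at this
    · have hP' : P e.1 = false := by simpa using hP
      have hfc : List.filter (fun x => P x.1) (e :: E') = List.filter (fun x => P x.1) E' := by
        simp [List.filter_cons, hP']
      rw [hfc]
      apply ih
      have := pvStep_items_filter P D D' e h
      rwa [if_neg hP] at this

theorem pv_insertBy_split {α : Type} (before : α → α → Bool) (x : α) (as' bs' : List α)
    (ha : ∀ a ∈ as', before x a = false) (hb : ∀ b ∈ bs', before x b = true) :
    PySem.List.insertBy before x (as' ++ bs') = as' ++ x :: bs' := by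
  induction as' with
  | nil =>
      cases bs' with
      | nil => rfl
      | cons b bs =>
          show (if before x b then _ else _) = _
          rw [if_pos (hb b (List.mem_cons_self))]; rfl
  | cons a as ih =>
      show (if before x a then _ else _) = _
      rw [if_neg (by simp [ha a (List.mem_cons_self)])]
      simp only [List.cons_append]
      rw [show as.append bs' = as ++ bs' from rfl, ih (fun a' h' => ha a' (List.mem_cons_of_mem _ h'))]

theorem pv_fold_insertBy_buckets {α : Type} (k : α → Int) (ks : List Int) (res : List α)
    (hks : ks.Pairwise (· < ·)) (hmem : ∀ e ∈ res, k e ∈ ks) :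
    res.foldl (fun acc x => PySem.List.insertBy (fun a b => decide (k a < k b)) x acc) []
    = ks.flatMap (fun dv => res.filter (fun e => k e == dv)) := by
  induction res using List.reverseRecOn with
  | nil => simp
  | append_singleton res x ih =>
      rw [List.foldl_append, List.foldl_cons, List.foldl_nil]
      rw [ih (fun e he => hmem e (List.mem_append_left _ he))]
      obtain ⟨as, bs, hsplit⟩ := List.append_of_mem (hmem x (by simp))
      subst hsplit
      have hpw := List.pairwise_append.mp hks
      have hlt_as : ∀ a ∈ as, a < k x := fun a ha => hpw.2.2 a ha _ (List.mem_cons_self)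
      have hlt_bs : ∀ b ∈ bs, k x < b := (List.pairwise_cons.mp hpw.2.1).1
      rw [List.flatMap_append, List.flatMap_cons]
      rw [← List.append_assoc]
      rw [pv_insertBy_split _ x _ _ ?ha ?hb]
      case ha =>
        intro a haa
        rcases List.mem_append.mp haa with h1 | h2
        · obtain ⟨dv, hdv, hmem'⟩ := List.mem_flatMap.mp h1
          have hka : k a = dv := by simpa using (List.mem_filter.mp hmem').2
          simp [hka]
          exact le_of_lt (hlt_as dv hdv)
        · have hka : k a = k x := by simpa using (List.mem_filter.mp h2).2
          simp [hka]
      case hb =>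
        intro b hbb
        obtain ⟨dv, hdv, hmem'⟩ := List.mem_flatMap.mp hbb
        have hkb : k b = dv := by simpa using (List.mem_filter.mp hmem').2
        simp [hkb]
        exact hlt_bs dv hdv
      have hgas : (List.flatMap (fun dv => List.filter (fun e => k e == dv) (res ++ [x])) as)
          = List.flatMap (fun dv => List.filter (fun e => k e == dv) res) as := by
        apply List.flatMap_congr
        intro dv hdv
        rw [List.filter_append]
        have : (k x == dv) = false := by
          simp only [beq_eq_false_iff_ne, ne_eq]
          exact fun hx => absurd (hx ▸ hlt_as dv hdv) (lt_irrefl _)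
        simp [this]
      have hgbs : (List.flatMap (fun dv => List.filter (fun e => k e == dv) (res ++ [x])) bs)
          = List.flatMap (fun dv => List.filter (fun e => k e == dv) res) bs := by
        apply List.flatMap_congr
        intro dv hdv
        rw [List.filter_append]
        have : (k x == dv) = false := by
          simp only [beq_eq_false_iff_ne, ne_eq]
          exact fun hx => absurd (hx ▸ hlt_bs dv hdv) (lt_irrefl _)
        simp [this]
      rw [List.flatMap_append, List.flatMap_cons, hgas, hgbs, List.filter_append]
      simp

-- foldl over a flatMap is the nested foldl
theorem pvFoldlFlatMap {α β γ : Type} (f : γ → β → γ) (g : α → List β) :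
    ∀ (l : List α) (a : γ),
    (l.flatMap g).foldl f a = l.foldl (fun acc x => (g x).foldl f acc) a := by
  intro l
  induction l with
  | nil => simp
  | cons x t ih => intro a; simp [List.flatMap_cons, List.foldl_append, ih]

-- filter of a strictly increasing Int list picks at most the one element
theorem pvFilter_pairwise_single : ∀ (l : List Int), l.Pairwise (· < ·) → ∀ (d : Int),
    l.filter (fun x => x == d) = if d ∈ l then [d] else [] := by
  intro l
  induction l with
  | nil => simp
  | cons a t ih =>
    intro hpw d
    obtain ⟨hlt, hpw'⟩ := List.pairwise_cons.mp hpw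
    by_cases had : a = d
    · subst had
      rw [List.filter_cons_of_pos (by simp)]
      rw [ih hpw' a, if_neg (fun hmem => absurd (hlt a hmem) (lt_irrefl a))]
      simp
    · rw [List.filter_cons_of_neg (by simpa using had)]
      rw [ih hpw' d]
      have : (d ∈ a :: t) ↔ (d ∈ t) := by
        simp [List.mem_cons]
        intro hda
        exact absurd hda.symm had
      by_cases hd : d ∈ t
      · rw [if_pos hd, if_pos (this.mpr hd)]
      · rw [if_neg hd, if_neg (fun hc => hd (this.mp hc))]

theorem pvPyRange_pairwise (a b : Int) : (PySem.List.pyRange a b 1).Pairwise (· < ·) := by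
  rw [PySem.List.pyRange_of_pos a b (by omega)]
  rw [List.pairwise_map]
  apply List.Pairwise.imp ?_ (List.pairwise_lt_range (n := _))
  intro m n h
  omega

theorem pvMax?_ge_aux : ∀ (t : List Int) (b : Int),
    ∃ m, PySem.List.max? (b :: t) (fun y => y) = some m ∧ b ≤ m ∧ ∀ x ∈ t, x ≤ m := by
  intro t
  induction t with
  | nil => intro b; exact ⟨b, rfl, le_refl b, by simp⟩
  | cons c t ih =>
    intro b
    obtain ⟨m, hm, hbm, hall⟩ := ih (if b < c then c else b)
    have hstep : PySem.List.max? (b :: c :: t) (fun y => y)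
        = PySem.List.max? ((if b < c then c else b) :: t) (fun y => y) := by
      by_cases h : b < c <;> simp [PySem.List.max?, h]
    refine ⟨m, hstep ▸ hm, by split at hbm <;> omega, ?_⟩
    intro x hx
    rcases List.mem_cons.mp hx with h | h
    · subst h; split at hbm <;> omega
    · exact hall x h

theorem pvMax?_ge (l : List Int) (x : Int) (hx : x ∈ l) :
    x ≤ (PySem.List.max? l (fun y => y)).getD 0 := by
  cases l with
  | nil => simp at hx
  | cons b t =>
    obtain ⟨m, hm, hbm, hall⟩ := pvMax?_ge_aux t b
    rw [hm]
    rcases List.mem_cons.mp hx with h | h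
    · subst h; simpa using hbm
    · simpa using hall x h

theorem pvRange_shift (M : Int) :
    (PySem.List.pyRange 0 (M-1) 1).map (· + 1) = PySem.List.pyRange 1 M 1 := by
  rw [PySem.List.pyRange_of_pos _ _ (by omega : (0:Int) < 1),
    PySem.List.pyRange_of_pos _ _ (by omega : (0:Int) < 1), List.map_map]
  have hif : (if 0 < M - 1 then ((M - 1 - 0 + 1 - 1) / 1).toNat else 0)
      = (if 1 < M then ((M - 1 + 1 - 1) / 1).toNat else 0) := by
    by_cases h : 1 < M
    · rw [if_pos (by omega), if_pos h]
      congr 1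
      omega
    · rw [if_neg (by omega), if_neg h]
  rw [hif]
  apply List.map_congr_left
  intro k _
  simp
  omega

def pvParts (path : String) : List String :=
  ((PySem.Str.split? path " - ").getD []).map PySem.Str.strip

def pvEvItem (parts : List String) (i : Int) : String × String :=
  (PySem.Str.join " - " (PySem.List.slice parts none (some i)), PySem.List.pyGetD parts i "")

def pvEvs (parts : List String) : List (String × String) :=
  (PySem.List.pyRange 1 (parts.length : Int)).map (pvEvItem parts)

def pvF (pt : String × PySem.Set String) : String × List String :=
  (pt.1, PySem.List.sorted pt.2 (fun x => x))

-- A's result, in events/pvStep form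
theorem pvA_form (paths : List String) :
    parse_paths_to_classifications paths
      = PySem.List.sorted
          ((((paths.map pvParts).flatMap pvEvs).foldl pvStep PySem.Dict.empty).items.map pvF)
          (fun x => (PySem.Str.count x.1 " - " : Int)) := by
  unfold parse_paths_to_classifications
  have h1 : (fun (d : PySem.Dict String (PySem.Set String)) (path : String) =>
      let parts := ((PySem.Str.split? path " - ").getD []).map PySem.Str.strip
      (PySem.List.pyRange 1 (parts.length : Int)).foldl (fun d i =>
        let current_path := PySem.Str.join " - " (PySem.List.slice parts none (some i))
        let output_title := PySem.List.pyGetD parts i ""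
        d.modify current_path PySem.Set.empty (fun s => PySem.Set.add s output_title)) d)
      = (fun d path => (pvEvs (pvParts path)).foldl pvStep d) := by
    funext d path
    show _ = List.foldl pvStep d (List.map (pvEvItem (pvParts path)) _)
    rw [List.foldl_map]
    rfl
  rw [h1]
  have h2 : paths.foldl (fun d path => (pvEvs (pvParts path)).foldl pvStep d) PySem.Dict.empty
      = ((paths.map pvParts).flatMap pvEvs).foldl pvStep PySem.Dict.empty := by
    rw [pvFoldlFlatMap, List.foldl_map]
  rw [h2]
  rfl

-- B's result, flatMap-of-levels form
theorem pvB_form (paths : List String) :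
    parse_paths_to_classifications_alt paths
      = (PySem.List.pyRange 1
          ((PySem.List.max? ((paths.map pvParts).map (fun parts => (parts.length : Int)))
            (fun x => x)).getD 0)).flatMap
          (fun d => (((paths.map pvParts).flatMap
              (fun parts => if (parts.length : Int) > d then [pvEvItem parts d] else [])).foldl
                pvStep PySem.Dict.empty).items.map pvF) := by
  unfold parse_paths_to_classifications_alt
  rw [show (fun path => List.map PySem.Str.strip ((PySem.Str.split? path " - ").getD [])) = pvParts from rfl]
  show (PySem.List.pyRange 1 _).foldl _ [] = _
  rw [PySem.List.foldl_append_eq_flatMap]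
  rw [List.nil_append]
  apply List.flatMap_congr
  intro d _
  congr 1
  have : ((paths.map pvParts).foldl (fun level parts =>
        if (parts.length : Int) > d then
          level.modify (PySem.Str.join " - " (PySem.List.slice parts none (some d)))
            PySem.Set.empty (fun s => PySem.Set.add s (PySem.List.pyGetD parts d ""))
        else level) PySem.Dict.empty)
      = ((paths.map pvParts).flatMap
          (fun parts => if (parts.length : Int) > d then [pvEvItem parts d] else [])).foldl
            pvStep PySem.Dict.empty := by
    rw [pvFoldlFlatMap]
    have hfn : (fun (level : PySem.Dict String (PySem.Set String)) (parts : List String) =>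
        List.foldl pvStep level (if (parts.length : Int) > d then [pvEvItem parts d] else []))
        = (fun (level : PySem.Dict String (PySem.Set String)) (parts : List String) =>
            if (parts.length : Int) > d then
              level.modify (PySem.Str.join " - " (PySem.List.slice parts none (some d)))
                PySem.Set.empty (fun s => PySem.Set.add s (PySem.List.pyGetD parts d ""))
            else level) := by
      funext level parts
      by_cases hlen : (parts.length : Int) > d
      · simp only [if_pos hlen, List.foldl_cons, List.foldl_nil]
        rfl
      · simp only [if_neg hlen, List.foldl_nil]
    rw [hfn]
  rw [this]


-- count of an event key inside Pre_: the i-th prefix of a clean path has count i-1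
theorem pvEvKeyCount (path : String) (hcl : pvCleanChars path.toList = true) (i : Int)
    (h1 : 1 ≤ i) (hlen : i < ((pvParts path).length : Int)) :
    (PySem.Str.count (pvEvItem (pvParts path) i).1 " - " : Int) = i - 1 := by
  have h0 : (0:Int) ≤ i := by omega
  have hkey : (pvEvItem (pvParts path) i).1
      = PySem.Str.join " - " (List.take i.toNat (pvParts path)) := by
    rw [pvEvItem, PySem.List.slice_to _ h0]
  rw [hkey]
  have hc := pvKeyCount path hcl i.toNat (by omega)
    (by show i.toNat < (pvParts path).length; omega)
  rw [show ((PySem.Str.split? path " - ").getD []).map PySem.Str.strip = pvParts path from rfl] at hc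
  rw [hc]
  omega

-- ===== VERDICT (by name: the statement is the Claim_ definition above) =====
theorem parse_paths_to_classifications_spec : Claim_equal_parse_paths_to_classifications := by
  intro paths _ hpre
  unfold Spec_parse_paths_to_classifications
  rw [pvA_form, pvB_form]
  have hclean : ∀ path ∈ paths, pvCleanChars path.toList = true := by
    intro path hp
    unfold Pre_parse_paths_to_classifications at hpre
    rw [List.all_eq_true] at hpre
    simpa using hpre path hp
  -- abbreviations
  have hM0 : ∀ (parts : List String), parts ∈ paths.map pvParts →
      ((parts.length : Int)) ≤ ((PySem.List.max? ((paths.map pvParts).map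
        (fun parts => (parts.length : Int))) (fun x => x)).getD 0) := by
    intro parts hp
    exact pvMax?_ge _ _ (List.mem_map_of_mem hp)
  set M : Int := (PySem.List.max? ((paths.map pvParts).map (fun parts => (parts.length : Int)))
    (fun x => x)).getD 0 with hMdef
  set E : List (String × String) := (paths.map pvParts).flatMap pvEvs with hEdef
  set D : PySem.Dict String (PySem.Set String) := E.foldl pvStep PySem.Dict.empty with hDdef
  -- every key of D is an event key, whose count is its depth minus one, below M - 1
  have hEkey : ∀ s ∈ E.map (·.1), ∃ i : Int, 1 ≤ i ∧ i - 1 < M - 1 ∧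
      (PySem.Str.count s " - " : Int) = i - 1 := by
    intro s hs
    obtain ⟨e, he, hse⟩ := List.mem_map.mp hs
    rw [hEdef] at he
    obtain ⟨parts, hparts, hev⟩ := List.mem_flatMap.mp he
    obtain ⟨path, hpath, hpp⟩ := List.mem_map.mp hparts
    obtain ⟨i, hi, hei⟩ := List.mem_map.mp (by rw [pvEvs] at hev; exact hev)
    obtain ⟨hi1, hi2, -⟩ := (PySem.List.mem_pyRange_iff_of_pos (by omega) i).mp hi
    refine ⟨i, hi1, ?_, ?_⟩
    · have := hM0 parts hparts
      omega
    · rw [← hse, ← hei, ← hpp]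
      exact pvEvKeyCount path (hclean path hpath) i hi1 (by rw [hpp]; exact hi2)
  have hkeysD : D.keys = PySem.Set.ofList (E.map (·.1)) := by
    rw [hDdef, show pvStep = (fun (d : PySem.Dict String (PySem.Set String)) (x : String × String)
        => d.insert x.1 ((d.getD x.1 PySem.Set.empty).add x.2)) from rfl]
    rw [PySem.Dict.keys_foldl_insert_key E (fun x => x.1)
      (fun d x => (d.getD x.1 PySem.Set.empty).add x.2) PySem.Dict.empty]
    rw [PySem.Dict.keys_empty, PySem.Set.update_nil_left]
  -- bucket A's sort by key value
  rw [PySem.List.sorted_eq_foldl_insertBy]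
  have hmem : ∀ e ∈ List.map pvF D.items,
      (fun x : String × List String => (PySem.Str.count x.1 " - " : Int)) e
        ∈ PySem.List.pyRange 0 (M-1) 1 := by
    intro e he
    obtain ⟨kv, hkv, hkve⟩ := List.mem_map.mp he
    have hk : kv.1 ∈ D.keys := PySem.Dict.mem_keys_of_mem_items D hkv
    rw [hkeysD, PySem.Set.mem_ofList] at hk
    obtain ⟨i, hi1, hiM, hcount⟩ := hEkey kv.1 hk
    rw [PySem.List.mem_pyRange_iff_of_pos (by omega)]
    rw [← hkve]
    refine ⟨?_, ?_, ?_⟩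
    · show (0:Int) ≤ (PySem.Str.count (pvF kv).1 " - " : Int)
      positivity
    · show (PySem.Str.count (pvF kv).1 " - " : Int) < M - 1
      rw [show (pvF kv).1 = kv.1 from rfl, hcount]
      omega
    · exact ⟨_, by ring⟩
  have hbuck := pv_fold_insertBy_buckets
    (fun x : String × List String => (PySem.Str.count x.1 " - " : Int))
    (PySem.List.pyRange 0 (M-1) 1) (List.map pvF D.items) (pvPyRange_pairwise 0 (M-1)) hmem
  rw [hbuck]
  -- reindex B's depth range to A's count range
  rw [← pvRange_shift M, List.flatMap_map]
  -- per-bucket equality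
  apply List.flatMap_congr
  intro c hc
  obtain ⟨hc0, hcM, -⟩ := (PySem.List.mem_pyRange_iff_of_pos (by omega) c).mp hc
  -- LHS: filter of mapped items = mapped filtered items
  rw [List.filter_map]
  rw [show ((fun (e : String × List String) => (PySem.Str.count e.1 " - " : Int) == c) ∘ pvF)
    = (fun (kv : String × PySem.Set String) => ((PySem.Str.count kv.1 " - " : Int) == c)) from rfl]
  rw [pvFoldFilter (fun s => ((PySem.Str.count s " - " : Int) == c)) E PySem.Dict.empty
    PySem.Dict.empty (by rfl)]
  congr 2
  -- E filtered to count = c  IS  the depth-(c+1) event of each path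
  rw [hEdef, List.filter_flatMap]
  congr 1
  apply List.flatMap_congr
  intro parts hparts
  obtain ⟨path, hpath, hpp⟩ := List.mem_map.mp hparts
  rw [pvEvs, List.filter_map]
  have hcong : List.filter ((fun (e : String × String) =>
        ((PySem.Str.count e.1 " - " : Int) == c)) ∘ pvEvItem parts)
        (PySem.List.pyRange 1 (parts.length : Int))
      = List.filter (fun i => i == c + 1) (PySem.List.pyRange 1 (parts.length : Int)) := by
    apply List.filter_congr
    intro i hi
    obtain ⟨hi1, hi2, -⟩ := (PySem.List.mem_pyRange_iff_of_pos (by omega) i).mp hi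
    have hcnt : (PySem.Str.count (pvEvItem parts i).1 " - " : Int) = i - 1 := by
      rw [← hpp]
      exact pvEvKeyCount path (hclean path hpath) i hi1 (by rw [hpp]; exact hi2)
    show ((PySem.Str.count (pvEvItem parts i).1 " - " : Int) == c) = (i == c + 1)
    rw [hcnt]
    by_cases hic : i = c + 1
    · subst hic
      simp
    · have : i - 1 ≠ c := by omega
      simp [hic, this]
  rw [hcong]
  rw [pvFilter_pairwise_single _ (pvPyRange_pairwise 1 (parts.length : Int)) (c+1)]
  by_cases hlt : c + 1 < (parts.length : Int)
  · rw [if_pos ((PySem.List.mem_pyRange_iff_of_pos (by omega) _).mpr ⟨by omega, hlt, ⟨_, by ring⟩⟩),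
      if_pos (by omega)]
    simp
  · rw [if_neg (fun hmem => hlt ((PySem.List.mem_pyRange_iff_of_pos (by omega) _).mp hmem).2.1),
      if_neg (by omega)]
    simp
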